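-- pv_equiv track=rewrite | github.com/syncropic/syncropel-registry-core | src/syncropel_registry_core/sct/helpers.py | resolve_namespace_hierarchy
-- ===== SOURCE A (Python) =====
-- def resolve_namespace_hierarchy(namespace: str) -> list[str]:
--     """Walk DEFAULT -> ORG -> PROJECT -> ENV -> JOB.
--
--     e.g., "acme/analytics/prod" -> ["default", "acme", "acme/analytics", "acme/analytics/prod"]
--     """
--     chain = ["default"]
--     if not namespace or namespace == "default":
--         return chain
--
--     parts = namespace.split("/")
--     for i in range(len(parts)):
--         chain.append("/".join(parts[: i + 1]))
--     return chain
-- ===== SOURCE B (Python) =====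
-- def resolve_namespace_hierarchy(namespace: str) -> list[str]:
--     """Walk DEFAULT -> ORG -> PROJECT -> ENV -> JOB.
--
--     Running-prefix scan: extends one accumulated string per part instead of re-joining each slice.
--     """
--     if not namespace or namespace == "default":
--         return ["default"]
--     parts = namespace.split("/")
--     prefix = parts[0]
--     chain = ["default", prefix]
--     for part in parts[1:]:
--         prefix = prefix + "/" + part
--         chain.append(prefix)
--     return chain
-- ===== Notes on version B (the rewrite author's own statement) =====
-- stated objective: alternative
-- what changed: Replaces the indexed loop that re-joins parts[:i+1] from scratch each iteration with a single running-prefix scan that extends one accumulated string per part.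
import Mathlib
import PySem

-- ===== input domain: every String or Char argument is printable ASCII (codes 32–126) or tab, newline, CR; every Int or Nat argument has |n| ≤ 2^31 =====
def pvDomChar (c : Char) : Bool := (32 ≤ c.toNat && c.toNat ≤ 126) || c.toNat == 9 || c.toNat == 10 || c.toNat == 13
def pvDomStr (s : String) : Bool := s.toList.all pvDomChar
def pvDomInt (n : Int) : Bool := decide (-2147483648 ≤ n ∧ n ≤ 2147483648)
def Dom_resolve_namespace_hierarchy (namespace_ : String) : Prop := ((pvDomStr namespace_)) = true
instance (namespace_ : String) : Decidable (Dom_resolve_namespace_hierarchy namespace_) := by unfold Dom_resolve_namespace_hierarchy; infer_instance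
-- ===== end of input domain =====

-- B replaces A's loop that re-joins parts[:i+1] from scratch each iteration with a single running-prefix scan.

-- ===== PORT A =====
def resolve_namespace_hierarchy (namespace_ : String) : List String :=
  let chain : List String := ["default"]
  if namespace_ = "" || namespace_ = "default" then chain
  else
    -- namespace.split("/"): the separator is the nonempty literal "/", so split? is always `some`
    let parts : List String := (PySem.Str.split? namespace_ "/").getD []
    (PySem.List.pyRange 0 (parts.length : Int) 1).foldl
      (fun chain i =>
        chain ++ [PySem.Str.join "/" (PySem.List.slice parts none (some (i + 1)))])
      chain

-- ===== PORT B =====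
def resolve_namespace_hierarchy_alt (namespace_ : String) : List String :=
  if namespace_ = "" || namespace_ = "default" then ["default"]
  else
    match (PySem.Str.split? namespace_ "/").getD [] with
    | [] => ["default"]   -- unreachable: str.split always returns at least one piece
    | p :: rest =>
      (rest.foldl
        (fun (st : List String × String) part =>
          let pref := PySem.Str.join "/" [st.2, part]   -- prefix = prefix + "/" + part
          (st.1 ++ [pref], pref))
        (["default", p], p)).1

-- ===== PRECONDITION & SPEC =====
def Spec_resolve_namespace_hierarchy (namespace_ : String) (out : List String) : Prop := out = resolve_namespace_hierarchy_alt namespace_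
instance (namespace_ : String) (out : List String) : Decidable (Spec_resolve_namespace_hierarchy namespace_ out) := by unfold Spec_resolve_namespace_hierarchy; infer_instance

-- ===== CLAIM (what is proved, stated in full; the proofs are below) =====
def Claim_equal_resolve_namespace_hierarchy : Prop := ∀ (namespace_ : String), Dom_resolve_namespace_hierarchy namespace_ → Spec_resolve_namespace_hierarchy namespace_ (resolve_namespace_hierarchy namespace_)

-- ===== LEMMAS AND PROOFS =====

-- the list of running prefixes B produces from a seed prefix
def prefList : String → List String → List String
  | _, [] => []
  | pref, x :: xs =>
    let pref' := PySem.Str.join "/" [pref, x]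
    pref' :: prefList pref' xs

theorem join_singleton_str (a : String) : PySem.Str.join "/" [a] = a := by
  apply String.toList_inj.mp
  simp [PySem.Str.toList_join, PySem.Chars.join_singleton]

theorem join_cons_cons_str (a b : String) (l : List String) :
    PySem.Str.join "/" (a :: b :: l) = PySem.Str.join "/" [a, PySem.Str.join "/" (b :: l)] := by
  apply String.toList_inj.mp
  simp [PySem.Str.toList_join, PySem.Chars.join_cons_cons, PySem.Chars.join_singleton]

theorem join2_assoc (a b c : String) :
    PySem.Str.join "/" [PySem.Str.join "/" [a, b], c] = PySem.Str.join "/" [a, PySem.Str.join "/" [b, c]] := by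
  apply String.toList_inj.mp
  simp [PySem.Str.toList_join, PySem.Chars.join_cons_cons, PySem.Chars.join_singleton]

theorem prefList_join (a : String) :
    ∀ (xs : List String) (pref : String),
      prefList (PySem.Str.join "/" [a, pref]) xs
        = (prefList pref xs).map (fun s => PySem.Str.join "/" [a, s]) := by
  intro xs
  induction xs with
  | nil => intro pref; simp [prefList]
  | cons x xs ih =>
      intro pref
      simp only [prefList, List.map_cons, join2_assoc]
      exact congrArg _ (ih _)

theorem foldB (rest : List String) :
    ∀ (acc : List String) (pref : String),
      (rest.foldl
          (fun (st : List String × String) part =>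
            let pref := PySem.Str.join "/" [st.2, part]
            (st.1 ++ [pref], pref))
          (acc, pref)).1
        = acc ++ prefList pref rest := by
  induction rest with
  | nil => intro acc pref; simp [prefList]
  | cons x xs ih =>
      intro acc pref
      simp only [List.foldl_cons, prefList]
      rw [ih]
      simp

theorem joinTake (rest : List String) :
    ∀ (p : String),
      (List.range (rest.length + 1)).map
          (fun k => PySem.Str.join "/" ((p :: rest).take (k + 1)))
        = p :: prefList p rest := by
  induction rest with
  | nil =>
      intro p
      simp [prefList, join_singleton_str]
  | cons x xs ih =>
      intro p
      simp only [List.length_cons]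
      rw [List.range_succ_eq_map]
      simp only [List.map_cons, List.map_map]
      refine congrArg₂ _ (by simp [join_singleton_str]) ?_
      have hmap :
          (List.range (xs.length + 1)).map
              ((fun k => PySem.Str.join "/" ((p :: x :: xs).take (k + 1))) ∘ Nat.succ)
            = (List.range (xs.length + 1)).map
                (fun k => PySem.Str.join "/" [p, PySem.Str.join "/" ((x :: xs).take (k + 1))]) := by
        apply List.map_congr_left
        intro k _
        simp only [Function.comp]
        rw [show (p :: x :: xs).take (Nat.succ k + 1) = p :: x :: xs.take k by simp [List.take_succ_cons]]
        rw [show (x :: xs).take (k + 1) = x :: xs.take k by simp [List.take_succ_cons]]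
        exact join_cons_cons_str p x (xs.take k)
      rw [hmap, show (fun k => PySem.Str.join "/" [p, PySem.Str.join "/" ((x :: xs).take (k + 1))])
            = (fun s => PySem.Str.join "/" [p, s]) ∘ (fun k => PySem.Str.join "/" ((x :: xs).take (k + 1))) from rfl,
          ← List.map_map, ih x]
      simp only [prefList, List.map_cons]
      rw [← prefList_join]

theorem slice_take (parts : List String) (k : Nat) :
    PySem.List.slice parts none (some ((0 : Int) + (k : Int) + 1)) = parts.take (k + 1) := by
  have : (0 : Int) + (k : Int) + 1 = ((k + 1 : Nat) : Int) := by push_cast; ring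
  rw [this, PySem.List.slice_to_natCast]

-- ===== VERDICT (by name: the statement is the Claim_ definition above) =====
theorem resolve_namespace_hierarchy_spec : Claim_equal_resolve_namespace_hierarchy := by
  intro namespace_ _
  unfold Spec_resolve_namespace_hierarchy resolve_namespace_hierarchy resolve_namespace_hierarchy_alt
  by_cases h : namespace_ = "" || namespace_ = "default"
  · simp [h]
  · simp only [h, Bool.false_eq_true, if_false]
    cases hp : (PySem.Str.split? namespace_ "/").getD [] with
    | nil => simp [PySem.List.pyRange_one_eq_nil]
    | cons p rest =>
        show _ = (rest.foldl
            (fun (st : List String × String) part =>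
              let pref := PySem.Str.join "/" [st.2, part]
              (st.1 ++ [pref], pref))
            (["default", p], p)).1
        rw [PySem.List.foldl_append_singleton_eq_map, foldB, PySem.List.pyRange_one, List.map_map]
        have : ((List.range ((((p :: rest).length : Int) - 0).toNat)).map
              ((fun i => PySem.Str.join "/" (PySem.List.slice (p :: rest) none (some (i + 1)))) ∘ fun k => (0 : Int) + ↑k))
            = (List.range (rest.length + 1)).map
                (fun k => PySem.Str.join "/" ((p :: rest).take (k + 1))) := by
          have hlen : ((((p :: rest).length : Int) - 0)).toNat = rest.length + 1 := by
            simp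
          rw [hlen]
          apply List.map_congr_left
          intro k _
          simp only [Function.comp]
          rw [slice_take]
        rw [this, joinTake]
        rfl
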